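-- pv_equiv track=rewrite | github.com/pavelb97/2ndYearPython | gardaDataAnalysis.py/gardaDataAnalysis.py | indexing_position
-- ===== SOURCE A (Python) =====
-- def indexing_position(all_stations):
--     processedList = []
--     listLength = len(all_stations)
--
--     for index in range(0, listLength):
--         processedList.insert(index, None)
--
--     for index in range(0, listLength-1):
--         processedList[index] = all_stations[index]
--
--     return processedList
-- ===== SOURCE B (Python) =====
-- def indexing_position(all_stations):
--     result = list(all_stations)
--     if result:
--         result[-1] = None
--     return result
-- ===== Notes on version B (the rewrite author's own statement) =====
-- stated objective: simpler
-- what changed: B copies the whole list once and nulls only the last slot (with an emptiness guard), instead of A's two index loops that pre-fill every slot with None and then overwrite the prefix.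
import Mathlib
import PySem

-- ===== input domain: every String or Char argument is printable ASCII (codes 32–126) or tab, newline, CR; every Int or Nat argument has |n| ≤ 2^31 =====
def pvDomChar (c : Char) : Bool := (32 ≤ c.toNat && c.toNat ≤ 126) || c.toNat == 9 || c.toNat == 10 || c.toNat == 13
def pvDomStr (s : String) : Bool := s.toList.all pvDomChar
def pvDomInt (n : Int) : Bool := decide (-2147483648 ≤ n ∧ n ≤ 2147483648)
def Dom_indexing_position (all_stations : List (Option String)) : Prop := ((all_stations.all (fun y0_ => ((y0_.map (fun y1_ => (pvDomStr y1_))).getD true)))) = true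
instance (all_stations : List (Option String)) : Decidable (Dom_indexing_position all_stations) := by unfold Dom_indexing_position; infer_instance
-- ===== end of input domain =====

-- B copies the list once and nulls only the last slot, instead of A's pre-fill-with-None
-- loop plus prefix-overwrite loop (objective: simpler).

-- ===== PORT A =====
def indexing_position (all_stations : List (Option String)) : List (Option String) :=
  let listLength : Int := (all_stations.length : Int)
  -- for index in range(0, listLength): processedList.insert(index, None)
  let processedList : List (Option String) :=
    (PySem.List.pyRange 0 listLength 1).foldl
      (fun acc index => PySem.List.insert acc index none) []
  -- for index in range(0, listLength-1): processedList[index] = all_stations[index]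
  (PySem.List.pyRange 0 (listLength - 1) 1).foldl
    (fun acc index => PySem.List.pySetD acc index (PySem.List.pyGetD all_stations index none))
    processedList

-- ===== PORT B =====
def indexing_position_alt (all_stations : List (Option String)) : List (Option String) :=
  let result := all_stations
  if result.isEmpty then result
  else PySem.List.pySetD result (-1) none

-- ===== PRECONDITION & SPEC =====
def Spec_indexing_position (all_stations : List (Option String)) (out : List (Option String)) : Prop := out = indexing_position_alt all_stations
instance (all_stations : List (Option String)) (out : List (Option String)) : Decidable (Spec_indexing_position all_stations out) := by unfold Spec_indexing_position; infer_instance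

-- ===== CLAIM (what is proved, stated in full; the proofs are below) =====
def Claim_equal_indexing_position : Prop := ∀ (all_stations : List (Option String)), Dom_indexing_position all_stations → Spec_indexing_position all_stations (indexing_position all_stations)

-- ===== LEMMAS AND PROOFS =====

-- A's first loop builds a list of n Nones (each insert happens at the end of the accumulator).
theorem pv_insLoop (n : Nat) :
    (PySem.List.pyRange 0 (n : Int) 1).foldl
      (fun (acc : List (Option String)) index => PySem.List.insert acc index none) []
      = List.replicate n none := by
  induction n with
  | zero => simp [PySem.List.pyRange_one_eq_nil]
  | succ m ih =>
    rw [show ((m + 1 : Nat) : Int) = (m : Int) + 1 by push_cast; ring,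
        PySem.List.pyRange_one_succ_right (by positivity), List.foldl_append, ih]
    simp only [List.foldl_cons, List.foldl_nil]
    rw [show (m : Int) = (((List.replicate m (none : Option String)).length : Nat) : Int) by simp,
        PySem.List.insert_natCast _ _ _ (le_refl _)]
    simp [List.replicate_succ']

-- A's second loop copies the first m elements of l over the accumulator.
theorem pv_setLoop (l acc : List (Option String)) (m : Nat)
    (hm : m ≤ l.length) (hacc : acc.length = l.length) :
    (PySem.List.pyRange 0 (m : Int) 1).foldl
      (fun acc index => PySem.List.pySetD acc index (PySem.List.pyGetD l index none)) acc
      = l.take m ++ acc.drop m := by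
  induction m with
  | zero => simp
  | succ k ih =>
    have hk : k ≤ l.length := Nat.le_of_succ_le hm
    rw [show ((k + 1 : Nat) : Int) = (k : Int) + 1 by push_cast; ring,
        PySem.List.pyRange_one_succ_right (by positivity), List.foldl_append, ih hk]
    simp only [List.foldl_cons, List.foldl_nil]
    have hkl : k < l.length := hm
    have hka : k < acc.length := by omega
    rw [PySem.List.pySetD_natCast, PySem.List.pyGetD_natCast, List.getD_eq_getElem l none hkl]
    have hdrop : acc.drop k = acc[k] :: acc.drop (k + 1) := List.drop_eq_getElem_cons hka
    have htk : (l.take k).length = k := by simp [Nat.min_eq_left hk]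
    rw [hdrop, List.set_append]
    simp only [htk, lt_irrefl, if_false, Nat.sub_self, List.set_cons_zero]
    have htake : List.take (k + 1) l = List.take k l ++ [l[k]] :=
      List.take_succ_eq_append_getElem hkl
    rw [htake, List.append_assoc, List.singleton_append]

-- ===== VERDICT (by name: the statement is the Claim_ definition above) =====
theorem indexing_position_spec : Claim_equal_indexing_position := by
  intro l _
  unfold Spec_indexing_position indexing_position indexing_position_alt
  dsimp only
  cases l with
  | nil => simp [PySem.List.pyRange_one_eq_nil]
  | cons x xs =>
    rw [if_neg (by simp)]
    have hlen : ((x :: xs).length : Int) - 1 = ((xs.length : Nat) : Int) := by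
      push_cast [List.length_cons]; ring
    rw [pv_insLoop, hlen,
        pv_setLoop (x :: xs) (List.replicate (x :: xs).length none) xs.length
          (by simp) (by simp)]
    -- B's side: result[-1] = None
    have hneg : PySem.List.pySetD (x :: xs) (-1) (none : Option String)
        = (x :: xs).set xs.length none := by
      simp [PySem.List.pySetD, PySem.List.pySet?, PySem.List.pyIdx?]
    rw [hneg]
    have hset : (x :: xs).set xs.length none
        = (x :: xs).take xs.length ++ [none] := by
      rw [List.set_eq_take_append_cons_drop]
      simp
    rw [hset]
    congr 1
    rw [List.drop_replicate]
    simp
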